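-- pv_equiv track=rewrite | github.com/sinystr/hackbulgaria | week02/task_9_fobonaccis_list.py | nth_fib_lists
-- ===== SOURCE A (Python) =====
-- def nth_fib_lists(listA, listB, n):
--     a = listA
--     b = listB
--     if n == 1:
--         return a
--     elif n == 2:
--         return b
--     else:
--         count = 2
--         max_count = n
--         while count < max_count:
--             count = count + 1
--             old_a = a
--             old_b = b
--             a = old_b
--             b = old_a + old_b
--         return b
-- ===== SOURCE B (Python) =====
-- def nth_fib_lists(listA, listB, n):
--     if n == 1:
--         return listA
--     elif n <= 2:
--         return listB
--     else:
--         return nth_fib_lists(listA, listB, n - 2) + nth_fib_lists(listA, listB, n - 1)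
-- ===== Notes on version B (the rewrite author's own statement) =====
-- stated objective: alternative
-- what changed: Replaced A's iterative while-loop with two rolling list variables by a direct recursion on n implementing f(n)=f(n-2)+f(n-1), with base cases n==1 and n<=2.
import Mathlib
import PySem

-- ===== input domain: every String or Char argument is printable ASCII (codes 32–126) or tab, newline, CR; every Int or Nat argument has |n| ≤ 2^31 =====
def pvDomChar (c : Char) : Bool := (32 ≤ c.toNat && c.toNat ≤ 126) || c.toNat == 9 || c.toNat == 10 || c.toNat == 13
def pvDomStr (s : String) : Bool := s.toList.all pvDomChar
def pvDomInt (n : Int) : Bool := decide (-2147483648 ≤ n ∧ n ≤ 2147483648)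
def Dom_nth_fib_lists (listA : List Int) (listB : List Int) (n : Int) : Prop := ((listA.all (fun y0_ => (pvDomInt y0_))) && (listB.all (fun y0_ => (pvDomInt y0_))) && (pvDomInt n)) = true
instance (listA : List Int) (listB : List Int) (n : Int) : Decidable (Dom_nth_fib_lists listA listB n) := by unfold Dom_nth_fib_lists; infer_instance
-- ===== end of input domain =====

-- B replaces A's iterative rolling-pair loop by direct recursion f(n)=f(n-2)+f(n-1) (alternative decomposition, same values).


-- ===== PORT A =====
-- while-loop of A: state (a, b, count); returns b when count >= max_count
def nthFibLoop (a : List Int) (b : List Int) (count : Int) (max_count : Int) : List Int :=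
  if count < max_count then
    nthFibLoop b (a ++ b) (count + 1) max_count
  else b
termination_by (max_count - count).toNat
decreasing_by omega

def nth_fib_lists (listA : List Int) (listB : List Int) (n : Int) : List Int :=
  if n = 1 then listA
  else if n = 2 then listB
  else nthFibLoop listA listB 2 n

-- ===== PORT B =====
def nth_fib_lists_alt (listA : List Int) (listB : List Int) (n : Int) : List Int :=
  if n = 1 then listA
  else if n ≤ 2 then listB
  else nth_fib_lists_alt listA listB (n - 2) ++ nth_fib_lists_alt listA listB (n - 1)
termination_by n.toNat
decreasing_by all_goals omega

-- ===== PRECONDITION & SPEC =====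
def Spec_nth_fib_lists (listA : List Int) (listB : List Int) (n : Int) (out : List Int) : Prop := out = nth_fib_lists_alt listA listB n
instance (listA : List Int) (listB : List Int) (n : Int) (out : List Int) : Decidable (Spec_nth_fib_lists listA listB n out) := by unfold Spec_nth_fib_lists; infer_instance

-- ===== CLAIM (what is proved, stated in full; the proofs are below) =====
def Claim_equal_nth_fib_lists : Prop := ∀ (listA : List Int) (listB : List Int) (n : Int), Dom_nth_fib_lists listA listB n → Spec_nth_fib_lists listA listB n (nth_fib_lists listA listB n)

-- ===== LEMMAS AND PROOFS =====

-- ===== VERDICT (by name: the statement is the Claim_ definition above) =====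
-- shift lemma: advancing the seed pair by one step shifts the index by one
theorem alt_shift (a b : List Int) (n : Int) (h : 1 ≤ n) :
    nth_fib_lists_alt b (a ++ b) n = nth_fib_lists_alt a b (n + 1) := by
  induction hk : n.toNat using Nat.strong_induction_on generalizing n with
  | _ k ih =>
    rw [nth_fib_lists_alt]; conv_rhs => rw [nth_fib_lists_alt]
    rcases Int.lt_or_le n 3 with h3 | h3
    · interval_cases n <;> simp [nth_fib_lists_alt]
    · have e1 : ¬ n = 1 := by omega
      have e2 : ¬ n ≤ 2 := by omega
      have f1 : ¬ n + 1 = 1 := by omega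
      have f2 : ¬ n + 1 ≤ 2 := by omega
      simp only [e1, e2, f1, f2, if_false]
      rw [ih (n - 2).toNat (by omega) (n - 2) (by omega) rfl,
          ih (n - 1).toNat (by omega) (n - 1) (by omega) rfl]
      have e3 : n - 2 + 1 = n + 1 - 2 := by ring
      have e4 : n - 1 + 1 = n + 1 - 1 := by ring
      rw [e3, e4]

-- the loop computes the recursion at index (max_count - count + 2)
theorem loop_eq_alt (a b : List Int) (count max_count : Int) (h : count < max_count) :
    nthFibLoop a b count max_count = nth_fib_lists_alt a b (max_count - count + 2) := by
  induction hk : (max_count - count).toNat using Nat.strong_induction_on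
    generalizing a b count with
  | _ k ih =>
    rw [nthFibLoop, if_pos h]
    rcases Int.lt_or_le (count + 1) max_count with h1 | h1
    · rw [ih (max_count - (count + 1)).toNat (by omega) b (a ++ b) (count + 1) h1 rfl]
      have : max_count - (count + 1) + 2 + 1 = max_count - count + 2 := by ring
      rw [alt_shift a b _ (by omega), this]
    · have hc : count + 1 = max_count := by omega
      rw [nthFibLoop, if_neg (by omega)]
      have : max_count - count + 2 = 3 := by omega
      rw [this]
      have h31 : (3:Int) - 2 = 1 := by norm_num
      have h32 : (3:Int) - 1 = 2 := by norm_num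
      rw [nth_fib_lists_alt, if_neg (by norm_num), if_neg (by norm_num), h31, h32,
          nth_fib_lists_alt, if_pos rfl, nth_fib_lists_alt,
          if_neg (by norm_num), if_pos (by norm_num)]

theorem nth_fib_lists_spec : Claim_equal_nth_fib_lists := by
  intro listA listB n _
  unfold Spec_nth_fib_lists nth_fib_lists
  rcases eq_or_ne n 1 with h1 | h1
  · simp [h1, nth_fib_lists_alt]
  rcases eq_or_ne n 2 with h2 | h2
  · simp [h2, nth_fib_lists_alt]
  simp only [h1, h2, if_false]
  rcases Int.lt_or_le 2 n with h3 | h3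
  · rw [loop_eq_alt _ _ _ _ h3]
    congr 1; omega
  · rw [nthFibLoop, if_neg (by omega), nth_fib_lists_alt,
        if_neg h1, if_pos (by omega)]
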